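-- pv_equiv track=rewrite | github.com/XOyarz/Mimi-job-app | mimi.py | get_common_pattern
-- ===== SOURCE A (Python) =====
-- import string
--
-- def get_common_pattern(fileLine):
--     # Get an array with letters a-z
--     alphabet = list(string.ascii_lowercase)
--     commonPattern = []
--     listLine = list(fileLine.strip('\n'))
--     dictionary = {}
--     for i in listLine:
--         # If char i has already been mapped in the dictionary,
--         # append its value to the new commonPattern array
--         if i in dictionary:
--             commonPattern.append(dictionary[i])
--         # Else add the key-value mapping to the dictionary,
--         # append the value to the new array and delete
--         # the value from the alphabet array
--         else:
--             dictionary[i] = alphabet[0]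
--             commonPattern.append(dictionary[i])
--             del alphabet[0]
--     pattern = ''.join(commonPattern)
--     return pattern
-- ===== SOURCE B (Python) =====
-- def get_common_pattern(fileLine):
--     # Each character's letter is the first alphabet letter offset by the number of distinct
--     # characters that occur strictly before its first occurrence.
--     line = fileLine.strip('\n')
--     return ''.join(chr(ord('a') + len(set(line[:line.index(c)]))) for c in line)
-- ===== Notes on version B (the rewrite author's own statement) =====
-- stated objective: alternative
-- what changed: B drops A's interleaved dict-and-alphabet loop entirely: each character's letter is computed directly as the first alphabet letter offset by len(set(line[:line.index(c)])) -- the count of distinct characters before that character's first occurrence -- using index/slice/set instead of any mapping table or sequential letter assignment.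
import Mathlib
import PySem

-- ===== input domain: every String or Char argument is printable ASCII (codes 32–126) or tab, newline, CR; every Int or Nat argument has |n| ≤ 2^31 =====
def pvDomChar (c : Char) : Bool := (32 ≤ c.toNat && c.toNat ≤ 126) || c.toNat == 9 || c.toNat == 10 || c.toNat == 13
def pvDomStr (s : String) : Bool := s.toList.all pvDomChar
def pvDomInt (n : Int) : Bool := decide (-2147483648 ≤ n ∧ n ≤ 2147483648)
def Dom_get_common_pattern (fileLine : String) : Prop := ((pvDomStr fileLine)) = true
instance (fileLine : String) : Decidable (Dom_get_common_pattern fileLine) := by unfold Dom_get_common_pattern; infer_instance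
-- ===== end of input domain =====

-- B computes each character's letter directly as the first alphabet letter offset by the number of distinct
-- characters before that character's first occurrence (index + slice + set, no dict and
-- no sequential letter assignment); objective: alternative algorithm, same result.


-- ===== PORT A =====
-- string.ascii_lowercase as a char list
def pvAscii : List Char := ['a','b','c','d','e','f','g','h','i','j','k','l','m','n','o','p','q','r','s','t','u','v','w','x','y','z']

-- A's loop: state is (remaining alphabet, dictionary); output built by cons (the append
-- accumulator rendered as structural recursion). `none` = the IndexError of `alphabet[0]`
-- on an exhausted alphabet.
def pvLoopA : List Char → List Char → PySem.Dict Char Char → Option (List Char)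
  | [], _, _ => some []
  | c :: cs, alpha, d =>
    match d.get? c with
    | some v => (pvLoopA cs alpha d).map (fun r => v :: r)
    | none =>
      match alpha with
      | [] => none                                   -- alphabet[0] raises IndexError
      | a :: as => (pvLoopA cs as (d.insert c a)).map (fun r => a :: r)   -- del alphabet[0]

def get_common_pattern (fileLine : String) : String :=
  match pvLoopA (PySem.Str.stripChars fileLine "\n").toList pvAscii PySem.Dict.empty with
  | some l => String.ofList l
  | none => ""                                       -- unreachable under Pre_

-- ===== PORT B =====
-- the codepoint-97 offset of len(set(line[:line.index(c)])): line.index(c) always succeeds (c is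
-- drawn from line), hence the getD 0; the slice line[:k] (0 ≤ k) is PySem.List.slice.
def pvLetterB (line : List Char) (c : Char) : Char :=
  Char.ofNat (97 + (PySem.Set.ofList
    (PySem.List.slice line none (some (((PySem.List.index? line c).getD 0 : Nat) : Int)))).length)

def get_common_pattern_alt (fileLine : String) : String :=
  let line := (PySem.Str.stripChars fileLine "\n").toList
  String.ofList (line.map (pvLetterB line))

-- ===== PRECONDITION & SPEC =====
-- Pre_ excludes exactly the strings whose stripped form has more than 26 distinct
-- characters: there Python A raises IndexError (alphabet exhausted).
def Pre_get_common_pattern (fileLine : String) : Prop :=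
  (PySem.List.dedup (PySem.Str.stripChars fileLine "\n").toList).length ≤ 26
instance (fileLine : String) : Decidable (Pre_get_common_pattern fileLine) := by
  unfold Pre_get_common_pattern; infer_instance

def pvWitness_get_common_pattern : String := "hello\n"

def Spec_get_common_pattern (fileLine : String) (out : String) : Prop := out = get_common_pattern_alt fileLine
instance (fileLine : String) (out : String) : Decidable (Spec_get_common_pattern fileLine out) := by unfold Spec_get_common_pattern; infer_instance

-- ===== CLAIM (what is proved, stated in full; the proofs are below) =====
def Claim_equal_get_common_pattern : Prop := ∀ (fileLine : String), Dom_get_common_pattern fileLine → Pre_get_common_pattern fileLine → Spec_get_common_pattern fileLine (get_common_pattern fileLine)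

-- ===== LEMMAS AND PROOFS =====

-- |set(xs)| is the toFinset cardinality.
theorem pvSetLen (xs : List Char) : (PySem.Set.ofList xs).length = xs.toFinset.card := by
  have h1 : (PySem.Set.ofList xs).toFinset = xs.toFinset := by
    ext a; simp [PySem.Set.mem_ofList]
  rw [← List.toFinset_card_of_nodup (PySem.Set.nodup_ofList (xs := xs)), h1]

-- B's letter for c, rewritten through take and toFinset.card.
theorem pvLetterB_eq (line : List Char) (c : Char) :
    pvLetterB line c
      = Char.ofNat (97 + (line.take ((PySem.List.index? line c).getD 0)).toFinset.card) := by
  unfold pvLetterB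
  rw [PySem.List.slice_to_natCast, pvSetLen]

-- the 26 alphabet letters by position
theorem pvAscii_get? (k : Nat) (h : k < 26) : pvAscii[k]? = some (Char.ofNat (97 + k)) := by
  revert h; revert k; decide

-- A's invariant: with p the processed prefix (L = p ++ cs fixed), the dictionary maps
-- exactly the characters of p to B's letters and the alphabet has lost |set(p)| letters;
-- then the rest of A's loop produces B's letters for cs.
theorem pvLoopA_inv (L : List Char) (hL : L.toFinset.card ≤ 26) :
    ∀ (cs p : List Char) (d : PySem.Dict Char Char), L = p ++ cs →
    (∀ c, d.get? c = if c ∈ p then some (pvLetterB L c) else none) →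
    pvLoopA cs (pvAscii.drop p.toFinset.card) d = some (cs.map (pvLetterB L)) := by
  intro cs
  induction cs with
  | nil => intro p d _ _; simp [pvLoopA]
  | cons c cs ih =>
    intro p d hLpc hd
    by_cases hmem : c ∈ p
    · -- already mapped
      have hget : d.get? c = some (pvLetterB L c) := by rw [hd c, if_pos hmem]
      have hfin : (p ++ [c]).toFinset = p.toFinset := by
        simp [Finset.insert_eq_self.mpr (List.mem_toFinset.mpr hmem)]
      have := ih (p ++ [c]) d (by simpa using hLpc)
        (by intro c'; rw [hd c']
            by_cases h' : c' ∈ p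
            · simp [h', List.mem_append]
            · have : ¬ c' ∈ p ++ [c] := by
                simp only [List.mem_append, List.mem_singleton]
                rintro (h | rfl) <;> [exact h' h; exact h' hmem]
              simp [h', this])
      rw [hfin] at this
      simp only [pvLoopA, hget, this, Option.map_some, List.map_cons]
    · -- fresh character: rank c = |set(p)|
      have hget : d.get? c = none := by rw [hd c, if_neg hmem]
      have hidx : PySem.List.index? L c = some p.length := by
        rw [hLpc, show c :: cs = [c] ++ cs from rfl, ← List.append_assoc,
          PySem.List.index?_append_of_mem cs (by simp),
          PySem.List.index?_append_singleton_self p c hmem]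
      have htake : L.take ((PySem.List.index? L c).getD 0) = p := by
        rw [hidx, hLpc]; exact List.take_left
      have hrank : pvLetterB L c = Char.ofNat (97 + p.toFinset.card) := by
        rw [pvLetterB_eq, htake]
      have hlt : p.toFinset.card < 26 := by
        have hsub : insert c p.toFinset ⊆ L.toFinset := by
          intro x hx
          rcases Finset.mem_insert.mp hx with rfl | hx
          · exact List.mem_toFinset.mpr (by simp [hLpc])
          · exact List.mem_toFinset.mpr (by
              simp only [hLpc, List.mem_append]; exact Or.inl (List.mem_toFinset.mp hx))
        have : (insert c p.toFinset).card ≤ L.toFinset.card := Finset.card_le_card hsub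
        rw [Finset.card_insert_of_notMem (fun h => hmem (List.mem_toFinset.mp h))] at this
        omega
      have hdrop : pvAscii.drop p.toFinset.card
          = Char.ofNat (97 + p.toFinset.card) :: pvAscii.drop (p.toFinset.card + 1) := by
        have hlen : p.toFinset.card < pvAscii.length := by simpa [pvAscii] using hlt
        rw [List.drop_eq_getElem_cons hlen]
        have := pvAscii_get? p.toFinset.card hlt
        rw [List.getElem?_eq_getElem hlen] at this
        simp only [Option.some.injEq] at this
        rw [this]
      have hfin : (p ++ [c]).toFinset.card = p.toFinset.card + 1 := by
        simp [Finset.card_insert_of_notMem (fun h => hmem (List.mem_toFinset.mp h))]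
      have hrec := ih (p ++ [c]) (d.insert c (Char.ofNat (97 + p.toFinset.card)))
        (by simpa using hLpc)
        (by intro c'
            by_cases hcc : c' = c
            · subst hcc
              rw [PySem.Dict.get?_insert_self, if_pos (by simp), hrank]
            · rw [PySem.Dict.get?_insert_of_ne d _ hcc, hd c']
              by_cases h' : c' ∈ p
              · simp [h', List.mem_append]
              · have : ¬ c' ∈ p ++ [c] := by
                  simp only [List.mem_append, List.mem_singleton]
                  rintro (h | h) <;> [exact h' h; exact hcc h]
                simp [h', this])
      rw [hfin] at hrec
      simp only [pvLoopA, hget, hdrop, hrec, Option.map_some, List.map_cons, hrank]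

-- ===== VERDICT (by name: the statement is the Claim_ definition above) =====
theorem get_common_pattern_spec : Claim_equal_get_common_pattern := by
  intro fileLine _ hpre
  show get_common_pattern fileLine = get_common_pattern_alt fileLine
  unfold get_common_pattern get_common_pattern_alt
  set L := (PySem.Str.stripChars fileLine "\n").toList with hLdef
  have hcard : L.toFinset.card ≤ 26 := by
    have := pvSetLen L
    rw [← PySem.List.dedup_eq_ofList] at this
    rw [← this]
    exact hpre
  have h := pvLoopA_inv L hcard L [] PySem.Dict.empty (by simp)
    (by intro c; simp [PySem.Dict.get?_empty])
  simp only [List.toFinset_nil, Finset.card_empty, List.drop_zero] at h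
  rw [h]
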